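-- pv_equiv track=rewrite | github.com/emmanuelniamba/Centralesupelec_risk_identification | srcc/utils/function.py | get_page_statistics
-- ===== SOURCE A (Python) =====
-- def get_page_statistics(pages):
--     """
--     Calcule des statistiques sur les pages.
--
--     Args:
--         pages (list): Liste des pages
--
--     Returns:
--         dict: Statistiques des pages
--     """
--     if not pages:
--         return {"total_pages": 0, "total_chars": 0, "avg_chars_per_page": 0}
--
--     total_chars = sum(len(page) for page in pages)
--
--     return {
--         "total_pages": len(pages),
--         "total_chars": total_chars,
--         "avg_chars_per_page": total_chars // len(pages) if pages else 0,
--         "shortest_page": min(len(page) for page in pages) if pages else 0,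
--         "longest_page": max(len(page) for page in pages) if pages else 0
--     }
-- ===== SOURCE B (Python) =====
-- def get_page_statistics(pages):
--     if not pages:
--         return {"total_pages": 0, "total_chars": 0, "avg_chars_per_page": 0}
--     total_chars = 0
--     shortest = longest = len(pages[0])
--     count = 0
--     for page in pages:
--         l = len(page)
--         total_chars += l
--         if l < shortest:
--             shortest = l
--         if longest < l:
--             longest = l
--         count += 1
--     return {
--         "total_pages": count,
--         "total_chars": total_chars,
--         "avg_chars_per_page": total_chars // count,
--         "shortest_page": shortest,
--         "longest_page": longest,
--     }
-- ===== Notes on version B (the rewrite author's own statement) =====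
-- stated objective: alternative
-- what changed: Replaces A's four separate generator passes (sum, min, max, plus len) with one explicit loop that accumulates total, running shortest/longest and a count in a single traversal.
import Mathlib
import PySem

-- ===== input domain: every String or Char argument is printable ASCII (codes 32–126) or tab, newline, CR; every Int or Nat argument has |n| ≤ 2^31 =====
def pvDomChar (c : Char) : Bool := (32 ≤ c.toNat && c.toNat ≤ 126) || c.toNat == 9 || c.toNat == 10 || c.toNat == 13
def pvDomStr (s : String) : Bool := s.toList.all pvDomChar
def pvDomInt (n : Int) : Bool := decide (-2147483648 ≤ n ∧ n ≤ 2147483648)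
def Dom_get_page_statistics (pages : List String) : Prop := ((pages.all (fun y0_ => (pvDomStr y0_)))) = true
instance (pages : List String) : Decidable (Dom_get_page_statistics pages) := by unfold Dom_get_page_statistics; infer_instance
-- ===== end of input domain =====

-- B folds A's four separate passes (len, sum, min, max) into one accumulating loop; same O(n) cost.

-- ===== PORT A =====
def get_page_statistics (pages : List String) : List (String × Int) :=
  if pages = [] then
    [("total_pages", 0), ("total_chars", 0), ("avg_chars_per_page", 0)]
  else
    let total_chars : Int := (pages.map (fun page => PySem.Str.len page)).foldl (· + ·) 0
    [("total_pages", (pages.length : Int)),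
     ("total_chars", total_chars),
     ("avg_chars_per_page", if pages ≠ [] then PySem.Int.floordiv total_chars (pages.length : Int) else 0),
     ("shortest_page", if pages ≠ [] then (PySem.List.min? (pages.map (fun page => PySem.Str.len page)) (fun x => x)).getD 0 else 0),
     ("longest_page", if pages ≠ [] then (PySem.List.max? (pages.map (fun page => PySem.Str.len page)) (fun x => x)).getD 0 else 0)]

-- ===== PORT B =====
-- state: (total_chars, shortest, longest, count)
def pvStatsLoop (pages : List String) (st : Int × Int × Int × Int) : Int × Int × Int × Int :=
  pages.foldl
    (fun st page =>
      let l := PySem.Str.len page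
      (st.1 + l,
       if l < st.2.1 then l else st.2.1,
       if st.2.2.1 < l then l else st.2.2.1,
       st.2.2.2 + 1))
    st

def get_page_statistics_alt (pages : List String) : List (String × Int) :=
  match pages with
  | [] => [("total_pages", 0), ("total_chars", 0), ("avg_chars_per_page", 0)]
  | p0 :: _ =>
    let l0 := PySem.Str.len p0
    let st := pvStatsLoop pages (0, l0, l0, 0)
    [("total_pages", st.2.2.2),
     ("total_chars", st.1),
     ("avg_chars_per_page", PySem.Int.floordiv st.1 st.2.2.2),
     ("shortest_page", st.2.1),
     ("longest_page", st.2.2.1)]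

-- ===== PRECONDITION & SPEC =====
def Spec_get_page_statistics (pages : List String) (out : List (String × Int)) : Prop := out = get_page_statistics_alt pages
instance (pages : List String) (out : List (String × Int)) : Decidable (Spec_get_page_statistics pages out) := by unfold Spec_get_page_statistics; infer_instance

-- ===== CLAIM (what is proved, stated in full; the proofs are below) =====
def Claim_equal_get_page_statistics : Prop := ∀ (pages : List String), Dom_get_page_statistics pages → Spec_get_page_statistics pages (get_page_statistics pages)

-- ===== LEMMAS AND PROOFS =====

theorem pvStatsLoop_eq (xs : List String) (t sh lo n : Int) :
    pvStatsLoop xs (t, sh, lo, n) =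
      ((xs.map (fun p => PySem.Str.len p)).foldl (· + ·) t,
       (xs.map (fun p => PySem.Str.len p)).foldl min sh,
       (xs.map (fun p => PySem.Str.len p)).foldl max lo,
       n + xs.length) := by
  induction xs generalizing t sh lo n with
  | nil => simp [pvStatsLoop]
  | cons p rest ih =>
    simp only [pvStatsLoop, List.foldl_cons, List.map_cons] at *
    rw [ih]
    have hmin : (if PySem.Str.len p < sh then PySem.Str.len p else sh) = min sh (PySem.Str.len p) := by
      simp [min_def]; split_ifs <;> omega
    have hmax : (if lo < PySem.Str.len p then PySem.Str.len p else lo) = max lo (PySem.Str.len p) := by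
      simp [max_def]; split_ifs <;> omega
    rw [hmin, hmax]
    simp [List.length_cons]
    omega

-- ===== VERDICT (by name: the statement is the Claim_ definition above) =====
theorem get_page_statistics_spec : Claim_equal_get_page_statistics := by
  intro pages _
  unfold Spec_get_page_statistics
  cases pages with
  | nil => rfl
  | cons p rest =>
    simp only [get_page_statistics, get_page_statistics_alt]
    rw [pvStatsLoop_eq]
    simp [PySem.List.min?_id_cons, PySem.List.max?_id_cons, min_self, max_self]
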